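-- pv_equiv track=rewrite | github.com/renglo/inca | package/inca/handlers/reducer.py | _room_occupancies_from_travelers
-- ===== SOURCE A (Python) =====
-- from typing import Any, Dict, List, Optional
--
-- def _room_occupancies_from_travelers(trip_intent: Dict[str, Any]) -> List[int]:
--     """Compute guest count per room from party.travelers (adults + children, max 4 per room). Same logic as hotel_quote_search."""
--     travelers = (trip_intent.get("party") or {}).get("travelers") or {}
--     adults = max(0, int(travelers.get("adults") or 0))
--     children = max(0, int(travelers.get("children") or 0))
--     total = adults + children
--     if total <= 0:
--         return [1]
--     max_per_room = 4
--     if total <= max_per_room: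
--         return [total]
--     occupancies: List[int] = []
--     remaining = total
--     while remaining > 0:
--         take = min(max_per_room, remaining)
--         occupancies.append(take)
--         remaining -= take
--     return occupancies
-- ===== SOURCE B (Python) =====
-- from typing import Any, Dict, List, Optional
--
-- def _room_occupancies_from_travelers(trip_intent: Dict[str, Any]) -> List[int]:
--     """Sum the party sizes with a fold over the two keys, then emit the room
--     list in closed form from divmod instead of a subtraction loop."""
--     travelers = (trip_intent.get("party") or {}).get("travelers") or {}
--     total = 0
--     for key in ("adults", "children"):
--         total += max(0, int(travelers.get(key) or 0))
--     if total <= 0: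
--         return [1]
--     q, r = divmod(total, 4)
--     return [4] * q + ([r] if r else [])
-- ===== Notes on version B (the rewrite author's own statement) =====
-- stated objective: simpler
-- what changed: A's repeated-subtraction while loop (and the total<=4 early branch it subsumes) is replaced by a closed-form list from divmod, and the two traveler counts are accumulated by a fold over the keys instead of two named bindings.
import Mathlib
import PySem

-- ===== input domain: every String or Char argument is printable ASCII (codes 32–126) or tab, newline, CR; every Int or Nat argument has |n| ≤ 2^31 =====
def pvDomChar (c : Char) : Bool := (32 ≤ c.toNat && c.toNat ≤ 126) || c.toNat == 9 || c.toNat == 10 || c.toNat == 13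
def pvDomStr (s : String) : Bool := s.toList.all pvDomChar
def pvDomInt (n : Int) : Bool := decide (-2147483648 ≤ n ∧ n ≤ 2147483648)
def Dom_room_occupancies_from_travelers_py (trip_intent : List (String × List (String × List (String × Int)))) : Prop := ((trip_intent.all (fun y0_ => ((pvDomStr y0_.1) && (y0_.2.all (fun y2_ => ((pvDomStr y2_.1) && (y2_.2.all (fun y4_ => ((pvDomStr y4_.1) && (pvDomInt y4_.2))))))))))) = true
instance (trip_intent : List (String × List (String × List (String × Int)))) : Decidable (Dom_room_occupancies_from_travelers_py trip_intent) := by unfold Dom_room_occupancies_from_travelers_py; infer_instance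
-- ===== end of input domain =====

-- B replaces A's repeated-subtraction while loop (and the total<=4 early branch) by the
-- closed-form list [4]*(total//4) + optional remainder, and sums the two traveler
-- counts by a fold over the keys; objective: simpler.

-- ===== PORT A =====
-- the `while remaining > 0` loop of A, fuel = initial remaining (each iteration strictly decreases remaining)
def pvLoopA : Nat → Int → List Int → List Int
  | 0, _, occupancies => occupancies
  | fuel + 1, remaining, occupancies =>
    if remaining > 0 then
      pvLoopA fuel (remaining - min 4 remaining) (occupancies ++ [min 4 remaining])
    else occupancies

def room_occupancies_from_travelers_py (trip_intent : List (String × List (String × List (String × Int)))) : List Int :=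
  let party := ((PySem.Dict.mk trip_intent).get? "party").getD []
  let travelers := ((PySem.Dict.mk party).get? "travelers").getD []
  let adults := max 0 (((PySem.Dict.mk travelers).get? "adults").getD 0)
  let children := max 0 (((PySem.Dict.mk travelers).get? "children").getD 0)
  let total := adults + children
  if total ≤ 0 then [1]
  else if total ≤ 4 then [total]
  else pvLoopA total.toNat total []

-- ===== PORT B =====
-- max(0, int(travelers.get(key) or 0)) for one key (Source B's loop body)
def pvKeyCount (travelers : List (String × Int)) (key : String) : Int :=
  max 0 (((PySem.Dict.mk travelers).get? key).getD 0)

def room_occupancies_from_travelers_py_alt (trip_intent : List (String × List (String × List (String × Int)))) : List Int :=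
  let travelers := ((PySem.Dict.mk (((PySem.Dict.mk trip_intent).get? "party").getD [])).get? "travelers").getD []
  let total := ["adults", "children"].foldl (fun acc key => acc + pvKeyCount travelers key) 0
  if total ≤ 0 then [1]
  else
    let q := PySem.Int.floordiv total 4
    let r := PySem.Int.mod total 4
    List.replicate q.toNat 4 ++ (if r ≠ 0 then [r] else [])

-- ===== PRECONDITION & SPEC =====
def Spec_room_occupancies_from_travelers_py (trip_intent : List (String × List (String × List (String × Int)))) (out : List Int) : Prop := out = room_occupancies_from_travelers_py_alt trip_intent
instance (trip_intent : List (String × List (String × List (String × Int)))) (out : List Int) : Decidable (Spec_room_occupancies_from_travelers_py trip_intent out) := by unfold Spec_room_occupancies_from_travelers_py; infer_instance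

-- ===== CLAIM (what is proved, stated in full; the proofs are below) =====
def Claim_equal_room_occupancies_from_travelers_py : Prop := ∀ (trip_intent : List (String × List (String × List (String × Int)))), Dom_room_occupancies_from_travelers_py trip_intent → Spec_room_occupancies_from_travelers_py trip_intent (room_occupancies_from_travelers_py trip_intent)

-- ===== LEMMAS AND PROOFS =====

-- the common closed form: total split into rooms of 4 plus a remainder room
def pvClosed (t : Nat) : List Int :=
  List.replicate (t / 4) 4 ++ (if t % 4 = 0 then [] else [((t % 4 : Nat) : Int)])

theorem pvClosed_small (t : Nat) (h1 : 1 ≤ t) (h4 : t ≤ 4) : pvClosed t = [(t : Int)] := by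
  interval_cases t <;> rfl

theorem pvLoopA_closed : ∀ (fuel : Nat) (r : Int) (occ : List Int), 0 ≤ r → r.toNat ≤ fuel →
    pvLoopA fuel r occ = occ ++ pvClosed r.toNat := by
  intro fuel
  induction fuel with
  | zero =>
    intro r occ h0 hf
    have : r = 0 := by omega
    subst this
    simp [pvLoopA, pvClosed]
  | succ n ih =>
    intro r occ h0 hf
    by_cases hr : r > 0
    · rw [pvLoopA, if_pos hr]
      by_cases h4 : r ≤ 4
      · have hmin : min 4 r = r := by omega
        rw [hmin]
        have : r - r = 0 := by omega
        rw [this, ih 0 (occ ++ [r]) (le_refl 0) (by omega)]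
        have h0t : (0 : Int).toNat = 0 := rfl
        rw [h0t, pvClosed_small r.toNat (by omega) (by omega)]
        have : ((r.toNat : Nat) : Int) = r := by omega
        rw [this]
        simp [pvClosed]
      · have hmin : min 4 r = 4 := by omega
        rw [hmin, ih (r - 4) (occ ++ [(4 : Int)]) (by omega) (by omega)]
        have ht : (r - 4).toNat = r.toNat - 4 := by omega
        rw [ht]
        have hd : r.toNat / 4 = (r.toNat - 4) / 4 + 1 := by omega
        have hm : r.toNat % 4 = (r.toNat - 4) % 4 := by omega
        unfold pvClosed
        rw [hd, hm, List.replicate_succ]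
        simp
    · rw [pvLoopA, if_neg hr]
      have : r = 0 := by omega
      subst this
      simp [pvClosed]

theorem pvBody_eq (total : Int) (h0 : 0 ≤ total) :
    (if total ≤ 0 then [1] else if total ≤ 4 then [total] else pvLoopA total.toNat total []) =
    (if total ≤ 0 then ([1] : List Int)
     else List.replicate (PySem.Int.floordiv total 4).toNat 4 ++
       (if PySem.Int.mod total 4 ≠ 0 then [PySem.Int.mod total 4] else [])) := by
  by_cases hz : total ≤ 0
  · rw [if_pos hz, if_pos hz]
  · rw [if_neg hz, if_neg hz]
    have hcast : total = ((total.toNat : Nat) : Int) := by omega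
    have hfd : PySem.Int.floordiv total 4 = ((total.toNat / 4 : Nat) : Int) := by
      rw [hcast]; exact_mod_cast PySem.Int.floordiv_natCast total.toNat 4
    have hmd : PySem.Int.mod total 4 = ((total.toNat % 4 : Nat) : Int) := by
      rw [hcast]; exact_mod_cast PySem.Int.mod_natCast total.toNat 4
    have hB : List.replicate (PySem.Int.floordiv total 4).toNat 4 ++
        (if PySem.Int.mod total 4 ≠ 0 then [PySem.Int.mod total 4] else []) = pvClosed total.toNat := by
      rw [hfd, hmd]
      unfold pvClosed
      by_cases hm0 : total.toNat % 4 = 0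
      · rw [hm0, if_pos rfl, if_neg (by norm_num), Int.toNat_natCast]
      · rw [if_neg hm0, if_pos (by exact_mod_cast hm0), Int.toNat_natCast]
    by_cases h4 : total ≤ 4
    · rw [if_pos h4, hB, pvClosed_small total.toNat (by omega) (by omega), ← hcast]
    · rw [if_neg h4, hB, pvLoopA_closed total.toNat total [] h0 (le_refl _), List.nil_append]

-- ===== VERDICT (by name: the statement is the Claim_ definition above) =====
theorem room_occupancies_from_travelers_py_spec : Claim_equal_room_occupancies_from_travelers_py := by
  intro trip_intent _
  unfold Spec_room_occupancies_from_travelers_py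
  show room_occupancies_from_travelers_py trip_intent = room_occupancies_from_travelers_py_alt trip_intent
  simp only [room_occupancies_from_travelers_py, room_occupancies_from_travelers_py_alt,
    List.foldl, pvKeyCount]
  rw [zero_add]
  exact pvBody_eq _ (add_nonneg (le_max_left 0 _) (le_max_left 0 _))
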